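-- pv_equiv track=rewrite | github.com/astonshane/AdventOfCode | solutions/aoc2015/day15.py | assignValues
-- ===== SOURCE A (Python) =====
-- import copy
--
-- MAX_TEASPOONS = 100
--
-- def assignValues(assignments, remainingKeys, assigned):
--     permutations = []
--     toAssign = remainingKeys[0]
--     remainingKeys.remove(toAssign)
--     if len(remainingKeys) == 0:
--         assignments[toAssign] = MAX_TEASPOONS - assigned
--         permutations.append(assignments)
--     else:
--         for i in range(0, MAX_TEASPOONS - assigned + 1):
--             newAssignments = copy.copy(assignments)
--             newAssignments[toAssign] = i
--             permutations += assignValues(newAssignments, copy.copy(remainingKeys), assigned + i)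
--     return permutations
-- ===== SOURCE B (Python) =====
-- MAX_TEASPOONS = 100
--
--
-- def assignValues(assignments, remainingKeys, assigned):
--     # Return-value equivalence: unlike A, B never mutates the assignments dict
--     # in place (A does so when only one key remains); remainingKeys loses its
--     # first element, as in A.
--     toAssign = remainingKeys.pop(0)
--     budget = MAX_TEASPOONS - assigned
--     keys = [toAssign] + remainingKeys
--     partials = [(assignments, 0)]
--     for k in keys[:-1]:
--         nxt = []
--         for d, used in partials:
--             nxt += [({**d, k: i}, used + i) for i in range(budget - used + 1)]
--         partials = nxt
--     return [{**d, keys[-1]: budget - used} for d, used in partials]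
-- ===== Notes on version B (the rewrite author's own statement) =====
-- stated objective: alternative
-- what changed: Replaces A's depth-first recursion (one recursive call per candidate teaspoon count per key) by an iterative breadth-first worklist of (partial dict, teaspoons used) pairs that is extended key by key and finalized for the last key.
import Mathlib
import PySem

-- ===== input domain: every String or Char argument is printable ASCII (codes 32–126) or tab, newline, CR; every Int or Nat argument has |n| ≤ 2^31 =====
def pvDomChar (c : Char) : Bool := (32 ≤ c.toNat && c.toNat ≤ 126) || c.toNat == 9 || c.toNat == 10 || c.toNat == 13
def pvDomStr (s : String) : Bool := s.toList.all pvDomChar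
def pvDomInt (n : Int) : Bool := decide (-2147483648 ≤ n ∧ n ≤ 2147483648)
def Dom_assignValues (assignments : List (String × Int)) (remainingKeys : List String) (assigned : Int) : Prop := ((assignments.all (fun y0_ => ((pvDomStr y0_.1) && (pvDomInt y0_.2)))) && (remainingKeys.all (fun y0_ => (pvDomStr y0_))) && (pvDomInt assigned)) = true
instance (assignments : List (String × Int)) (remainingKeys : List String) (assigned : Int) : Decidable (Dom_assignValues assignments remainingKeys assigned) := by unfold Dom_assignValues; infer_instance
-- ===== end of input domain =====

-- B replaces A's depth-first recursion by an iterative breadth-first worklist of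
-- (dict, used) partial assignments (objective: alternative decomposition, same cost);
-- equivalence is about the RETURN value (A mutates remainingKeys/assignments in place, B only pops remainingKeys).


-- ===== PORT A =====
-- A's recursion, on the dict itself; the [] case is unreachable under Pre_ (Python raises IndexError).
def assignValuesCore (assignments : PySem.Dict String Int) (remainingKeys : List String) (assigned : Int) : List (PySem.Dict String Int) :=
  match remainingKeys with
  | [] => []
  | toAssign :: rest =>
    if rest = [] then
      [assignments.insert toAssign (100 - assigned)]
    else
      (PySem.List.pyRange 0 (100 - assigned + 1) 1).foldl
        (fun permutations i =>
          permutations ++ assignValuesCore (assignments.insert toAssign i) rest (assigned + i))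
        []
termination_by remainingKeys.length
decreasing_by simp

def assignValues (assignments : List (String × Int)) (remainingKeys : List String) (assigned : Int) : List (List (String × Int)) :=
  (assignValuesCore (PySem.Dict.ofList assignments) remainingKeys assigned).map (·.items)

-- ===== PORT B =====
-- one breadth-first step: extend every partial (d, used) with every value 0..budget-used for key k
def altStep (budget : Int) (partials : List (PySem.Dict String Int × Int)) (k : String) : List (PySem.Dict String Int × Int) :=
  partials.foldl
    (fun nxt du =>
      nxt ++ (PySem.List.pyRange 0 (budget - du.2 + 1) 1).map (fun i => (du.1.insert k i, du.2 + i)))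
    []

def assignValuesAltCore (assignments : PySem.Dict String Int) (remainingKeys : List String) (assigned : Int) : List (PySem.Dict String Int) :=
  match remainingKeys with
  | [] => []   -- pop(0) raises IndexError in Python; unreachable under Pre_
  | toAssign :: rest =>
    let budget := 100 - assigned
    let keys := toAssign :: rest
    let partials := keys.dropLast.foldl (altStep budget) [(assignments, 0)]
    partials.map (fun du => du.1.insert (keys.getLastD toAssign) (budget - du.2))

def assignValues_alt (assignments : List (String × Int)) (remainingKeys : List String) (assigned : Int) : List (List (String × Int)) :=
  (assignValuesAltCore (PySem.Dict.ofList assignments) remainingKeys assigned).map (·.items)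

-- ===== PRECONDITION & SPEC =====
-- Pre_ excludes only remainingKeys = [], on which Python A raises IndexError (remainingKeys[0]).
def Pre_assignValues (assignments : List (String × Int)) (remainingKeys : List String) (assigned : Int) : Prop := remainingKeys ≠ []
instance (assignments : List (String × Int)) (remainingKeys : List String) (assigned : Int) : Decidable (Pre_assignValues assignments remainingKeys assigned) := by unfold Pre_assignValues; infer_instance

def pvWitness_assignValues : (List (String × Int)) × List String × Int := ([("a", 0)], ["b", "c"], 98)

def Spec_assignValues (assignments : List (String × Int)) (remainingKeys : List String) (assigned : Int) (out : List (List (String × Int))) : Prop := out = assignValues_alt assignments remainingKeys assigned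
instance (assignments : List (String × Int)) (remainingKeys : List String) (assigned : Int) (out : List (List (String × Int))) : Decidable (Spec_assignValues assignments remainingKeys assigned out) := by unfold Spec_assignValues; infer_instance

-- ===== CLAIM (what is proved, stated in full; the proofs are below) =====
def Claim_equal_assignValues : Prop := ∀ (assignments : List (String × Int)) (remainingKeys : List String) (assigned : Int), Dom_assignValues assignments remainingKeys assigned → Pre_assignValues assignments remainingKeys assigned → Spec_assignValues assignments remainingKeys assigned (assignValues assignments remainingKeys assigned)

-- ===== LEMMAS AND PROOFS =====

-- altStep is a flatMap
theorem altStep_eq_flatMap (budget : Int) (partials : List (PySem.Dict String Int × Int)) (k : String) :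
    altStep budget partials k
      = partials.flatMap (fun du => (PySem.List.pyRange 0 (budget - du.2 + 1) 1).map (fun i => (du.1.insert k i, du.2 + i))) := by
  unfold altStep
  simpa using PySem.List.foldl_append_eq_flatMap _ _ []

-- the recursive branch of A is a flatMap over the range
theorem assignValuesCore_cons (assignments : PySem.Dict String Int) (toAssign k2 : String)
    (rest : List String) (assigned : Int) :
    assignValuesCore assignments (toAssign :: k2 :: rest) assigned
      = (PySem.List.pyRange 0 (100 - assigned + 1) 1).flatMap
          (fun i => assignValuesCore (assignments.insert toAssign i) (k2 :: rest) (assigned + i)) := by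
  rw [assignValuesCore]
  simp only [reduceCtorEq, if_false]
  simpa using PySem.List.foldl_append_eq_flatMap
    (fun i => assignValuesCore (assignments.insert toAssign i) (k2 :: rest) (assigned + i))
    (PySem.List.pyRange 0 (100 - assigned + 1) 1) []

-- main invariant: B's worklist pass over (toAssign :: rest) computes, for every seeded
-- partial (d, used), exactly A's recursion from d with assigned = 100 - (budget - used)
theorem worklist_eq (rest : List String) (toAssign : String) (budget : Int)
    (P : List (PySem.Dict String Int × Int)) :
    ((toAssign :: rest).dropLast.foldl (altStep budget) P).map
        (fun du => du.1.insert ((toAssign :: rest).getLastD toAssign) (budget - du.2))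
      = P.flatMap (fun du => assignValuesCore du.1 (toAssign :: rest) (100 - (budget - du.2))) := by
  induction rest generalizing toAssign P with
  | nil =>
      rw [show (([toAssign] : List String).dropLast) = ([] : List String) from rfl, List.foldl_nil,
        show ([toAssign].getLastD toAssign) = toAssign from rfl]
      rw [show (fun du : PySem.Dict String Int × Int =>
            assignValuesCore du.1 [toAssign] (100 - (budget - du.2)))
          = (fun du => [du.1.insert toAssign (budget - du.2)]) from ?_]
      · exact List.map_eq_flatMap ..
      · funext du
        have h : (100 : Int) - (100 - (budget - du.2)) = budget - du.2 := by omega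
        rw [assignValuesCore]
        simp only [h, if_pos]
  | cons k2 rest ih =>
      rw [show ((toAssign :: k2 :: rest).dropLast) = toAssign :: (k2 :: rest).dropLast from rfl,
        List.foldl_cons]
      have ih' := ih k2 (altStep budget P toAssign)
      simp only [List.getLastD_cons] at ih' ⊢
      rw [ih', altStep_eq_flatMap, List.flatMap_assoc]
      congr 1
      funext du
      rw [List.flatMap_map, assignValuesCore_cons]
      have h : (100 : Int) - (100 - (budget - du.2)) + 1 = budget - du.2 + 1 := by omega
      rw [h]
      congr 1
      funext i
      congr 1
      omega

-- ===== VERDICT (by name: the statement is the Claim_ definition above) =====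
theorem assignValues_spec : Claim_equal_assignValues := by
  intro assignments remainingKeys assigned _hDom hPre
  unfold Spec_assignValues assignValues assignValues_alt assignValuesAltCore
  match remainingKeys, hPre with
  | toAssign :: rest, _ =>
    simp only
    rw [worklist_eq]
    simp
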